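-- pv_equiv track=rewrite | github.com/pedronery07/Academia-Python | 8. dicionário/dif3/bingo.py | define_vencedores
-- ===== SOURCE A (Python) =====
-- def define_vencedores(sorteados, cartelas):
--     pontuações = {}
--     for jogador, cartela in cartelas.items():
--         pontuação = 0
--         for num in cartela:
--             if num in sorteados:
--                 pontuação += 1
--         pontuações[jogador] = pontuação
--     maior = max(pontuações.values())
--     venc = []
--     for jogador, points in pontuações.items():
--         if points == maior:
--             venc.append(jogador)
--     return venc
-- ===== SOURCE B (Python) =====
-- def define_vencedores(sorteados, cartelas):
--     # Single pass: track the best score seen so far and the players holding it;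
--     # no score dict, no trailing max() and rescan.
--     melhor = None
--     venc = []
--     for jogador, cartela in cartelas.items():
--         pontos = sum(1 for num in cartela if num in sorteados)
--         if melhor is None or pontos > melhor:
--             melhor = pontos
--             venc = [jogador]
--         elif pontos == melhor:
--             venc.append(jogador)
--     return venc
-- ===== Notes on version B (the rewrite author's own statement) =====
-- stated objective: simpler
-- what changed: A builds a player->score dict, then takes max of its values and rescans the dict for ties; B keeps no dict at all and computes the winners in a single pass with a running best score and winners-so-far list, resetting the list on a new best and appending on a tie.
import Mathlib
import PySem

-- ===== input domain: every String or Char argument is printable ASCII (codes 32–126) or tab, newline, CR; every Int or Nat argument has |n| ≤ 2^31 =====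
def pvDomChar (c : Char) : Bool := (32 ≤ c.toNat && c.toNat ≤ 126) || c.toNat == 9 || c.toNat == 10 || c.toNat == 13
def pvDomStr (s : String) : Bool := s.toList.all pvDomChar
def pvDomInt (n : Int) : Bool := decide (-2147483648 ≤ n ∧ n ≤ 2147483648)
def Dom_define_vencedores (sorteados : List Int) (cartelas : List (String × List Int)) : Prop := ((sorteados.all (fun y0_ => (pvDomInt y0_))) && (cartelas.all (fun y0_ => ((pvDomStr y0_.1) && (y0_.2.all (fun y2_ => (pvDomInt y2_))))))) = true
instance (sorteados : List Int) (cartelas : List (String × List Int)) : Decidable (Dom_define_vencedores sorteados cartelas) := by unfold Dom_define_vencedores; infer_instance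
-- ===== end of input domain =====

-- B replaces A's player→score dict plus two trailing scans (max of the values, rescan
-- for ties) by one pass keeping a running best score and its winners list (objective:
-- simpler).

-- ===== PORT A =====
-- the dict argument arrives as an association list; Python builds the dict first (ofList)
def define_vencedores (sorteados : List Int) (cartelas : List (String × List Int)) : List String :=
  let pontuações :=
    (PySem.Dict.ofList cartelas).items.foldl
      (fun d p =>
        d.insert p.1 (p.2.foldl (fun acc num => if sorteados.contains num then acc + 1 else acc) (0 : Int)))
      PySem.Dict.empty
  match PySem.List.max? pontuações.values (fun v => v) with
  | none => []   -- Python raises ValueError here (empty dict); excluded by Pre_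
  | some maior =>
      pontuações.items.foldl (fun venc p => if p.2 = maior then venc ++ [p.1] else venc) []

-- ===== PORT B =====
-- single pass; state = (best score so far : Option Int, winners so far)
def define_vencedores_alt (sorteados : List Int) (cartelas : List (String × List Int)) : List String :=
  ((PySem.Dict.ofList cartelas).items.foldl
    (fun st p =>
      let pontos : Int := p.2.countP (fun num => sorteados.contains num)
      match st.1 with
      | none => (some pontos, [p.1])
      | some melhor =>
          if melhor < pontos then (some pontos, [p.1])
          else if pontos = melhor then (st.1, st.2 ++ [p.1])
          else st)
    ((none : Option Int), ([] : List String))).2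

-- ===== PRECONDITION & SPEC =====
-- On an empty cartelas dict Python A's max() raises ValueError, so it is excluded.
def Pre_define_vencedores (sorteados : List Int) (cartelas : List (String × List Int)) : Prop :=
  cartelas ≠ []
instance (sorteados : List Int) (cartelas : List (String × List Int)) : Decidable (Pre_define_vencedores sorteados cartelas) := by unfold Pre_define_vencedores; infer_instance

def pvWitness_define_vencedores : List Int × (List (String × List Int)) :=
  ([1, 2], [("ana", [1, 3]), ("bia", [2, 1])])

def Spec_define_vencedores (sorteados : List Int) (cartelas : List (String × List Int)) (out : List String) : Prop := out = define_vencedores_alt sorteados cartelas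
instance (sorteados : List Int) (cartelas : List (String × List Int)) (out : List String) : Decidable (Spec_define_vencedores sorteados cartelas out) := by unfold Spec_define_vencedores; infer_instance

-- ===== CLAIM (what is proved, stated in full; the proofs are below) =====
def Claim_equal_define_vencedores : Prop := ∀ (sorteados : List Int) (cartelas : List (String × List Int)), Dom_define_vencedores sorteados cartelas → Pre_define_vencedores sorteados cartelas → Spec_define_vencedores sorteados cartelas (define_vencedores sorteados cartelas)
-- ===== LEMMAS AND PROOFS =====

-- A's result, characterised: score each card, take the max of the score list, keep the
-- players whose score equals it (dict insertion over the distinct player keys appends).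
theorem define_vencedores_char (s : List Int) (c : List (String × List Int)) :
    define_vencedores s c =
      (match PySem.List.max? ((PySem.Dict.ofList c).items.map
          (fun p => ((p.2.countP (fun num => s.contains num)) : Int))) (fun v => v) with
       | none => []
       | some maior =>
           ((PySem.Dict.ofList c).items.filter
             (fun p => decide (((p.2.countP (fun num => s.contains num)) : Int) = maior))).map (·.1)) := by
  unfold define_vencedores
  have hfresh : ∀ a ∈ (PySem.Dict.ofList c).items,
      (PySem.Dict.empty : PySem.Dict String Int).contains a.1 = false := by
    intro a _; simp [PySem.Dict.contains_empty]
  have hnd : ((PySem.Dict.ofList c).items.map Prod.fst).Nodup := PySem.Dict.nodup_keys_ofList c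
  have hit := PySem.Dict.items_foldl_insert_fresh (PySem.Dict.ofList c).items Prod.fst
      (fun p => ((p.2.countP (fun num => s.contains num)) : Int)) PySem.Dict.empty hfresh hnd
  simp only [PySem.List.foldl_if_add_one, zero_add, PySem.Dict.values, hit]
  simp only [PySem.Dict.empty, List.nil_append, List.map_map, Function.comp_def,
    PySem.List.foldl_append_ite, List.filter_map, List.map_map, Function.comp_def, List.nil_append]

-- The running-max loop, characterised on an arbitrary list with an arbitrary score
-- function: its final state is (max of the scores, the players scoring it, in order).
theorem runmax_char (f : (String × List Int) → Int) (l : List (String × List Int)) :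
    l.foldl
      (fun (st : Option Int × List String) p =>
        match st.1 with
        | none => (some (f p), [p.1])
        | some melhor =>
            if melhor < f p then (some (f p), [p.1])
            else if f p = melhor then (st.1, st.2 ++ [p.1])
            else st)
      ((none : Option Int), ([] : List String))
    = (PySem.List.max? (l.map f) (fun v => v),
       match PySem.List.max? (l.map f) (fun v => v) with
       | none => []
       | some m => (l.filter (fun p => decide (f p = m))).map (·.1)) := by
  induction l using List.reverseRecOn with
  | nil => rfl
  | append_singleton t p ih =>
      rw [List.foldl_append, ih]
      cases hm : PySem.List.max? (t.map f) (fun v => v) with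
      | none =>
          rw [PySem.List.max?_eq_none_iff, List.map_eq_nil_iff] at hm
          subst hm
          simp [PySem.List.max?, List.foldl]
      | some m =>
          have hle : ∀ q ∈ t, f q ≤ m := by
            intro q hq
            exact PySem.List.max?_isMax (key := fun v => v) hm (f q) (List.mem_map_of_mem hq)
          have hmax : PySem.List.max? ((t ++ [p]).map f) (fun v => v)
              = (if m < f p then some (f p) else some m) := by
            simp only [PySem.List.max?] at hm ⊢
            simp only [List.map_append, List.foldl_append, hm, List.map, List.foldl]
          rw [hmax]
          simp only [List.foldl_cons, List.foldl_nil]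
          by_cases hlt : m < f p
          · simp only [if_pos hlt]
            have hfilt : t.filter (fun q => decide (f q = f p)) = [] := by
              rw [List.filter_eq_nil_iff]
              intro q hq
              simp only [decide_eq_true_eq]
              exact fun he => absurd (he ▸ hle q hq) (not_le.mpr hlt)
            simp [List.filter_append, hfilt, List.filter]
          · simp only [if_neg hlt]
            by_cases heq : f p = m
            · simp [List.filter_append, List.filter, heq]
            · simp [List.filter_append, List.filter, heq]

-- ===== VERDICT (by name: the statement is the Claim_ definition above) =====
theorem define_vencedores_spec : Claim_equal_define_vencedores := by
  intro s c _ _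
  unfold Spec_define_vencedores define_vencedores_alt
  rw [define_vencedores_char]
  have h := runmax_char (fun p => ((p.2.countP (fun num => s.contains num)) : Int))
      (PySem.Dict.ofList c).items
  simp only at h ⊢
  rw [h]
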